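-- pv_equiv track=rewrite | github.com/kirtan226/python-practice-programs | neumeric_seesaw.py | numeric_seesaw
-- ===== SOURCE A (Python) =====
-- def numeric_seesaw(n):
--     new=[]
--     for i in range(1,n+1):
--         new.append(i)
--         if i==n:
--             for i in range(n - 1, 0, -1):
--                 new.append(i)
--     return new
-- ===== SOURCE B (Python) =====
-- def numeric_seesaw(n):
--     return [n - abs(k) for k in range(-(n - 1), n)]
-- ===== Notes on version B (the rewrite author's own statement) =====
-- stated objective: idiomatic
-- what changed: Replaces the two-phase ascending loop with a nested descending inner loop by a single comprehension computing each element by the closed form n - abs(k) over the symmetric index range -(n-1)..n-1.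
import Mathlib
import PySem

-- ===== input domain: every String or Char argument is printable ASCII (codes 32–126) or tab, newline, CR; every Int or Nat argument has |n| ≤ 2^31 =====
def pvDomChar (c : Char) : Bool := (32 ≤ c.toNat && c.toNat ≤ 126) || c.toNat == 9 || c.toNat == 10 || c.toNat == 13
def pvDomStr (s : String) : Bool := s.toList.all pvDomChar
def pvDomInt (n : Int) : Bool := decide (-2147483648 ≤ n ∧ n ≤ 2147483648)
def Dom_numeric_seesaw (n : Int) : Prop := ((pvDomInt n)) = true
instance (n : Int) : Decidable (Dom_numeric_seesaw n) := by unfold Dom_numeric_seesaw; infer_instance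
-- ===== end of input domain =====

-- B replaces A's two-phase build (ascending loop with a nested descending loop) by one
-- closed-form comprehension n - |k| over a symmetric index range (idiomatic, same cost).

-- ===== PORT A =====
def numeric_seesaw (n : Int) : List Int :=
  (PySem.List.pyRange 1 (n + 1) 1).foldl
    (fun new i =>
      let new := new ++ [i]
      if i = n then
        (PySem.List.pyRange (n - 1) 0 (-1)).foldl (fun new j => new ++ [j]) new
      else new) []

-- ===== PORT B =====
def numeric_seesaw_alt (n : Int) : List Int :=
  (PySem.List.pyRange (-(n - 1)) n 1).map (fun k => n - |k|)

-- ===== PRECONDITION & SPEC =====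
def Spec_numeric_seesaw (n : Int) (out : List Int) : Prop := out = numeric_seesaw_alt n
instance (n : Int) (out : List Int) : Decidable (Spec_numeric_seesaw n out) := by unfold Spec_numeric_seesaw; infer_instance

-- ===== CLAIM (what is proved, stated in full; the proofs are below) =====
def Claim_equal_numeric_seesaw : Prop := ∀ (n : Int), Dom_numeric_seesaw n → Spec_numeric_seesaw n (numeric_seesaw n)

-- ===== LEMMAS AND PROOFS =====

-- A's outer loop body, with the 'if i = n' branch that never fires for i < n removed,
-- is a plain append; folding appends yields init ++ list.
theorem pv_a_eq (n : Int) (hn : 1 ≤ n) :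
    numeric_seesaw n = PySem.List.pyRange 1 n 1 ++ [n] ++ PySem.List.pyRange (n - 1) 0 (-1) := by
  unfold numeric_seesaw
  rw [PySem.List.pyRange_one_succ_right (by omega : (1:Int) ≤ n), List.foldl_append]
  rw [PySem.List.foldl_congr_mem (PySem.List.pyRange 1 n 1) _
        (fun (new : List Int) (i : Int) => new ++ [i]) []
        (by intro acc x hx
            rw [PySem.List.mem_pyRange_one] at hx
            have hne : ¬ x = n := by omega
            simp [hne])]
  rw [PySem.List.foldl_append_singleton_eq_map (f := fun (i : Int) => i)]
  simp only [List.foldl_cons, List.foldl_nil, List.map_id_fun', id, List.nil_append]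
  rw [if_true]
  rw [PySem.List.foldl_append_singleton_eq_map (f := fun (j : Int) => j)]
  simp only [List.map_id_fun', id]

theorem pv_b_eq (n : Int) (hn : 1 ≤ n) :
    numeric_seesaw_alt n = PySem.List.pyRange 1 n 1 ++ [n] ++ PySem.List.pyRange (n - 1) 0 (-1) := by
  unfold numeric_seesaw_alt
  rw [PySem.List.pyRange_one_append (-(n - 1)) 1 n (by omega) (by omega), List.map_append]
  congr 1
  · -- ascending half: k = -(n-1) .. 0 gives n - |k| = n + k, i.e. 1 .. n
    rw [← PySem.List.pyRange_one_succ_right (by omega : (1:Int) ≤ n)]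
    rw [PySem.List.pyRange_one (-(n - 1)) 1, PySem.List.pyRange_one 1 (n + 1), List.map_map]
    rw [show (1 - -(n - 1)).toNat = (n + 1 - 1).toNat from by omega]
    apply List.map_congr_left
    intro k hk
    rw [List.mem_range] at hk
    simp only [Function.comp]
    rw [abs_of_nonpos (by omega)]
    omega
  · -- descending half: k = 1 .. n-1 gives n - |k| = n - k, i.e. n-1 .. 1
    rw [PySem.List.pyRange_one 1 n, PySem.List.pyRange_neg_one (n - 1) 0, List.map_map]
    rw [show (n - 1 - 0).toNat = (n - 1).toNat from by omega]
    apply List.map_congr_left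
    intro k hk
    rw [List.mem_range] at hk
    simp only [Function.comp]
    rw [abs_of_nonneg (by omega)]
    omega

-- ===== VERDICT (by name: the statement is the Claim_ definition above) =====
theorem numeric_seesaw_spec : Claim_equal_numeric_seesaw := by
  intro n _
  unfold Spec_numeric_seesaw
  by_cases hn : 1 ≤ n
  · rw [pv_a_eq n hn, pv_b_eq n hn]
  · unfold numeric_seesaw numeric_seesaw_alt
    rw [PySem.List.pyRange_one_eq_nil (by omega : n + 1 ≤ 1),
        PySem.List.pyRange_one_eq_nil (by omega : n ≤ -(n - 1))]
    simp
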